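-- pv_equiv track=rewrite | github.com/dongyifeng/dyf_py | zuo_shen/打表法.py | min_bags
-- ===== SOURCE A (Python) =====
-- def min_bag_base6(rest):
--     return int(rest / 6) if rest % 6 == 0 else -1
--
-- def min_bags(apple):
--     if apple < 0: return -1
--     bg6 = -1
--     bg8 = int(apple / 8)
--     rest = apple - 8 * bg8
--     while bg8 >= 0 and rest < 24:
--         rest_use6 = min_bag_base6(rest)
--         if rest_use6 != -1:
--             bg6 = rest_use6
--             break
--         bg8 -= 1
--         rest = apple - 8 * bg8
--
--     return -1 if bg6 == -1 else bg6 + bg8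
-- ===== SOURCE B (Python) =====
-- def min_bags(apple):
--     if apple < 0 or apple % 2 == 1:
--         return -1
--     if apple >= 18:
--         return (apple - 18) // 8 + 3
--     return {0: 0, 6: 1, 8: 1, 12: 2, 14: 2, 16: 2}.get(apple, -1)
-- ===== Notes on version B (the rewrite author's own statement) =====
-- stated objective: simpler
-- what changed: Replaced A's trial loop over bag-of-8 counts with a closed-form answer: a six-entry table for apple < 18 and (apple-18)//8 + 3 for even apple >= 18, no loop at all.
import Mathlib
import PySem

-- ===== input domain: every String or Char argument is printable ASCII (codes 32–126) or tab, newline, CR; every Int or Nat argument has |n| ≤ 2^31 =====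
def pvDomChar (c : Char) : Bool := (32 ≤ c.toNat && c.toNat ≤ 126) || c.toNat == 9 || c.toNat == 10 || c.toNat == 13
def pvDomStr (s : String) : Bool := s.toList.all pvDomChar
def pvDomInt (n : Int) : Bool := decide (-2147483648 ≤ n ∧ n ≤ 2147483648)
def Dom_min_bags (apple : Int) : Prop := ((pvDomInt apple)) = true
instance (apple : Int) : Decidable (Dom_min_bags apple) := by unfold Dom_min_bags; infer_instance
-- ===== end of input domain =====

-- B replaces A's downward trial loop over bag-of-8 counts by a closed form (small table + (apple-18)//8 + 3); objective: simpler.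

-- ===== PORT A =====
-- int(rest / 6): taken only when rest % 6 == 0, where float/true division then int() equals exact division
-- (6 ∣ rest, so ediv is exact); rest % 6 with positive modulus 6 is Lean's emod.
def min_bag_base6 (rest : Int) : Int :=
  if rest % 6 = 0 then rest / 6 else -1

-- the while loop of A; fuel is a termination guard only: the call site passes (bg8+1).toNat + 1,
-- enough for the whole descent (bg8 decreases by 1 each iteration and the loop exits once bg8 < 0),
-- so fuel never runs out and the function equals Python's unbounded while loop.
def minBagsLoop (fuel : Nat) (apple bg6 bg8 : Int) : Int × Int :=
  match fuel with
  | 0 => (bg6, bg8)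
  | fuel + 1 =>
    if 0 ≤ bg8 ∧ apple - 8 * bg8 < 24 then
      let rest := apple - 8 * bg8
      let rest_use6 := min_bag_base6 rest
      if rest_use6 ≠ -1 then (rest_use6, bg8)
      else minBagsLoop fuel apple bg6 (bg8 - 1)
    else (bg6, bg8)

-- int(apple / 8): reached only when 0 ≤ apple, where float division by 8 then int() equals apple / 8 (ediv) exactly on Dom.
def min_bags (apple : Int) : Int :=
  if apple < 0 then -1
  else
    let bg8 := apple / 8
    let r := minBagsLoop ((bg8 + 1).toNat + 1) apple (-1) bg8
    if r.1 = -1 then -1 else r.1 + r.2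

-- ===== PORT B =====
-- apple % 2 and (apple - 18) // 8: positive moduli/divisors, so Python's % and // are Lean's emod/ediv here.
def min_bags_alt (apple : Int) : Int :=
  if apple < 0 ∨ apple % 2 = 1 then -1
  else if 18 ≤ apple then (apple - 18) / 8 + 3
  else (PySem.Dict.ofList [((0:Int), (0:Int)), (6, 1), (8, 1), (12, 2), (14, 2), (16, 2)]).getD apple (-1)

-- ===== PRECONDITION & SPEC =====
def Spec_min_bags (apple : Int) (out : Int) : Prop := out = min_bags_alt apple
instance (apple : Int) (out : Int) : Decidable (Spec_min_bags apple out) := by unfold Spec_min_bags; infer_instance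

-- ===== CLAIM (what is proved, stated in full; the proofs are below) =====
def Claim_equal_min_bags : Prop := ∀ (apple : Int), Dom_min_bags apple → Spec_min_bags apple (min_bags apple)

-- ===== LEMMAS AND PROOFS =====

-- one unfolding of the loop
theorem minBagsLoop_succ (f : Nat) (apple c b : Int) :
    minBagsLoop (f + 1) apple c b =
      if 0 ≤ b ∧ apple - 8 * b < 24 then
        if min_bag_base6 (apple - 8 * b) ≠ -1 then (min_bag_base6 (apple - 8 * b), b)
        else minBagsLoop f apple c (b - 1)
      else (c, b) := rfl

-- shifting apple by +8 and the starting bag-8 count by +1 runs the loop through the same rest values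
theorem minBagsLoop_shift (fuel : Nat) (b apple c : Int) (ha : 16 ≤ apple) (hb : -1 ≤ b)
    (hf : (b + 1).toNat < fuel) :
    minBagsLoop (fuel + 1) (apple + 8) c (b + 1) =
      ((minBagsLoop fuel apple c b).1, (minBagsLoop fuel apple c b).2 + 1) := by
  induction fuel generalizing b with
  | zero => omega
  | succ f ih =>
    rw [minBagsLoop_succ (f + 1) (apple + 8) c (b + 1), minBagsLoop_succ f apple c b]
    have harg : apple + 8 - 8 * (b + 1) = apple - 8 * b := by ring
    rw [harg]
    rcases eq_or_lt_of_le hb with h | h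
    · -- b = -1: left does one extra iteration test with rest = apple + 8 ≥ 24 and exits
      rw [if_neg (show ¬((0:Int) ≤ b + 1 ∧ apple - 8 * b < 24) by omega),
        if_neg (show ¬((0:Int) ≤ b ∧ apple - 8 * b < 24) by omega)]
    · have hb0 : 0 ≤ b := by omega
      by_cases hc : apple - 8 * b < 24
      · rw [if_pos (show (0:Int) ≤ b + 1 ∧ apple - 8 * b < 24 from ⟨by omega, hc⟩),
          if_pos (show (0:Int) ≤ b ∧ apple - 8 * b < 24 from ⟨hb0, hc⟩)]
        by_cases hu : min_bag_base6 (apple - 8 * b) ≠ -1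
        · rw [if_pos hu, if_pos hu]
        · rw [if_neg hu, if_neg hu, show b + 1 - 1 = b - 1 + 1 by ring]
          exact ih (b - 1) (by omega) (by omega)
      · rw [if_neg (show ¬((0:Int) ≤ b + 1 ∧ apple - 8 * b < 24) by omega),
          if_neg (show ¬((0:Int) ≤ b ∧ apple - 8 * b < 24) by omega)]
  
-- on a break the loop's first component is ≥ 0 and so is the bag-8 count (needs rest ≥ 0, i.e. 8*b ≤ apple)
theorem minBagsLoop_pos (fuel : Nat) (b apple : Int) (hba : 8 * b ≤ apple) :
    (minBagsLoop fuel apple (-1) b).1 = -1 ∨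
      (0 ≤ (minBagsLoop fuel apple (-1) b).1 ∧ 0 ≤ (minBagsLoop fuel apple (-1) b).2) := by
  induction fuel generalizing b with
  | zero => simp [minBagsLoop]
  | succ f ih =>
    rw [minBagsLoop_succ]
    by_cases hc : 0 ≤ b ∧ apple - 8 * b < 24
    · rw [if_pos hc]
      by_cases hu : min_bag_base6 (apple - 8 * b) ≠ -1
      · rw [if_pos hu]
        unfold min_bag_base6 at *
        by_cases h6 : (apple - 8 * b) % 6 = 0
        · simp_all
          omega
        · simp_all
      · rw [if_neg hu]
        exact ih (b - 1) (by omega)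
    · rw [if_neg hc]; simp

-- A without its let-bindings, off the negative branch
theorem min_bags_eq (apple : Int) (h : ¬ apple < 0) :
    min_bags apple =
      if (minBagsLoop ((apple / 8 + 1).toNat + 1) apple (-1) (apple / 8)).1 = -1 then -1
      else (minBagsLoop ((apple / 8 + 1).toNat + 1) apple (-1) (apple / 8)).1 +
           (minBagsLoop ((apple / 8 + 1).toNat + 1) apple (-1) (apple / 8)).2 := by
  simp only [min_bags, if_neg h]

-- A(apple + 8) in terms of A(apple), for apple ≥ 16
theorem min_bags_shift (apple : Int) (ha : 16 ≤ apple) :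
    min_bags (apple + 8) = if min_bags apple = -1 then -1 else min_bags apple + 1 := by
  rw [min_bags_eq (apple + 8) (by omega), min_bags_eq apple (by omega)]
  have hdiv : (apple + 8) / 8 = apple / 8 + 1 := by omega
  rw [hdiv, show (apple / 8 + 1 + 1).toNat + 1 = ((apple / 8 + 1).toNat + 1) + 1 by omega,
    minBagsLoop_shift ((apple / 8 + 1).toNat + 1) (apple / 8) apple (-1) ha (by omega) (by omega)]
  have hpos := minBagsLoop_pos ((apple / 8 + 1).toNat + 1) (apple / 8) apple (by omega)
  set r := minBagsLoop ((apple / 8 + 1).toNat + 1) apple (-1) (apple / 8) with hr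
  by_cases h1 : r.1 = -1
  · rw [if_pos (show (r.1, r.2 + 1).1 = -1 from h1), if_pos h1, if_pos rfl]
  · rcases hpos with h | ⟨h2, h3⟩
    · exact absurd h h1
    · rw [if_neg (show ¬ (r.1, r.2 + 1).1 = -1 from h1), if_neg h1,
        if_neg (show ¬(r.1 + r.2 = -1) by omega)]
      show r.1 + (r.2 + 1) = r.1 + r.2 + 1
      ring

-- B(apple + 8) in terms of B(apple), for apple ≥ 16
theorem min_bags_alt_shift (apple : Int) (ha : 16 ≤ apple) :
    min_bags_alt (apple + 8) = if min_bags_alt apple = -1 then -1 else min_bags_alt apple + 1 := by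
  unfold min_bags_alt
  by_cases hodd : apple % 2 = 1
  · rw [if_pos (show apple + 8 < 0 ∨ (apple + 8) % 2 = 1 from Or.inr (by omega)),
      if_pos (show apple < 0 ∨ apple % 2 = 1 from Or.inr hodd), if_pos rfl]
  · rw [if_neg (show ¬(apple + 8 < 0 ∨ (apple + 8) % 2 = 1) by omega),
      if_neg (show ¬(apple < 0 ∨ apple % 2 = 1) by omega),
      if_pos (show (18:Int) ≤ apple + 8 by omega)]
    by_cases h18 : 18 ≤ apple
    · rw [if_pos h18,
        if_neg (show ¬((apple - 18) / 8 + 3 = -1) by omega),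
        show (apple + 8 - 18) / 8 = (apple - 18) / 8 + 1 by omega]
      ring
    · have h16 : apple = 16 := by omega
      subst h16
      decide

-- base cases: equality for 0 ≤ apple < 24
theorem min_bags_base : ∀ n : Nat, n < 24 → min_bags (n : Int) = min_bags_alt (n : Int) := by
  decide

-- equality on all naturals, by strong induction from the base with the two shift lemmas
theorem min_bags_nat (n : Nat) : min_bags (n : Int) = min_bags_alt (n : Int) := by
  induction n using Nat.strong_induction_on with
  | _ n ih =>
    by_cases hsmall : n < 24
    · exact min_bags_base n hsmall
    · have hm : ((n - 8 : Nat) : Int) = (n : Int) - 8 := by omega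
      have h16 : (16 : Int) ≤ ((n - 8 : Nat) : Int) := by omega
      have hA := min_bags_shift ((n - 8 : Nat) : Int) h16
      have hB := min_bags_alt_shift ((n - 8 : Nat) : Int) h16
      have hih := ih (n - 8) (by omega)
      rw [hm, show ((n : Int) - 8) + 8 = (n : Int) by ring] at hA hB
      rw [hm] at hih
      rw [hA, hB, hih]

-- ===== VERDICT (by name: the statement is the Claim_ definition above) =====
theorem min_bags_spec : Claim_equal_min_bags := by
  intro apple _
  unfold Spec_min_bags
  by_cases hneg : apple < 0
  · unfold min_bags min_bags_alt
    rw [if_pos hneg, if_pos (Or.inl hneg)]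
  · rw [show apple = ((apple.toNat : Nat) : Int) by omega]
    exact min_bags_nat apple.toNat
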